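-- pv_equiv track=rewrite | github.com/Ankit-29/competitive_programming | Greedy/parentingPartner.py | parentingPartner
-- ===== SOURCE A (Python) =====
-- def parentingPartner(tasks):
--     Hash = {}
--     sortedTasks = sorted(tasks,key=lambda x:(x[0],x[1]))
--     CameronCurr = 0; JamieCurr = 0 ;ret = ""
--     for x in sortedTasks:
--         if(x[0]>=CameronCurr):
--             CameronCurr = x[1]
--             if(x not in Hash):Hash[x] = []
--             Hash[x].append('C')
--         elif(x[0]>=JamieCurr):
--             JamieCurr = x[1]
--             if(x not in Hash):Hash[x] = []
--             Hash[x].append('J')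
--         else:
--             return "IMPOSSIBLE"
--     for x in tasks:
--         ret += Hash[x][0]
--         del Hash[x][0]
--
--     return ret
-- ===== SOURCE B (Python) =====
-- def parentingPartner(tasks):
--     # Two staged "chain peeling" passes instead of one interleaved two-counter scan:
--     # Cameron takes the greedy compatible chain of the sorted tasks; Jamie takes the
--     # greedy chain of the leftovers; any task left after both peels makes it IMPOSSIBLE.
--     def peel(idxs):
--         taken, rest, curr = [], [], 0
--         for i in idxs:
--             if tasks[i][0] >= curr:
--                 curr = tasks[i][1]
--                 taken.append(i)
--             else:
--                 rest.append(i)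
--         return taken, rest
--
--     order = sorted(range(len(tasks)), key=lambda i: (tasks[i][0], tasks[i][1]))
--     cameron, rest = peel(order)
--     jamie, rest = peel(rest)
--     if rest:
--         return "IMPOSSIBLE"
--     ans = [''] * len(tasks)
--     for i in cameron:
--         ans[i] = 'C'
--     for i in jamie:
--         ans[i] = 'J'
--     return ''.join(ans)
-- ===== Notes on version B (the rewrite author's own statement) =====
-- stated objective: alternative
-- what changed: Instead of one interleaved scan that juggles both parents' counters and a tuple-keyed dict-of-lists for reconstruction, B peels two greedy compatible chains in staged passes (Cameron's chain from the sorted indices, Jamie's chain from the leftovers, leftovers after both mean IMPOSSIBLE) and writes letters into an answer array by original index.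
import Mathlib
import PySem

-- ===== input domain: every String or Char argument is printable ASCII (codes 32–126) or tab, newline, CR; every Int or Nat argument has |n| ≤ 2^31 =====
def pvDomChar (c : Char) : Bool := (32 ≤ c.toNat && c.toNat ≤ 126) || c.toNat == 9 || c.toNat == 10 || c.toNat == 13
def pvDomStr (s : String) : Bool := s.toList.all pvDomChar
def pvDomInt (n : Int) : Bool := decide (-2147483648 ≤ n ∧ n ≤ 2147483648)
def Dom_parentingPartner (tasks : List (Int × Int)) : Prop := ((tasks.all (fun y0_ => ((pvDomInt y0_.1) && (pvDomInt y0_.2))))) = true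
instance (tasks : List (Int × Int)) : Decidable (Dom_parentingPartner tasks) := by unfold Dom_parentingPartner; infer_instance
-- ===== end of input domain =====

-- B replaces A's single interleaved two-counter scan plus tuple-keyed dict reconstruction by
-- two staged chain-peeling passes and an answer array indexed by original position (objective: alternative).

-- ===== PORT A =====
-- 'if x not in Hash: Hash[x] = []' followed by 'Hash[x].append(c)' (append on the now-present key = Dict.modify)
def pvDstepA (h : PySem.Dict (Int × Int) (List Char)) (x : Int × Int) (c : Char) :
    PySem.Dict (Int × Int) (List Char) :=
  (if h.contains x then h else h.insert x []).modify x [] (· ++ [c])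

-- the first 'for x in sortedTasks' loop; 'none' = the early return "IMPOSSIBLE"
def pvLoopA : List (Int × Int) → PySem.Dict (Int × Int) (List Char) → Int → Int →
    Option (PySem.Dict (Int × Int) (List Char))
  | [], h, _, _ => some h
  | x :: rest, h, cam, _jam =>
    if x.1 ≥ cam then pvLoopA rest (pvDstepA h x 'C') x.2 _jam
    else if x.1 ≥ _jam then pvLoopA rest (pvDstepA h x 'J') cam x.2
    else none

-- the second 'for x in tasks' loop: ret += Hash[x][0]; del Hash[x][0]
-- (every x of tasks is a key of Hash with a nonempty list, so the '?' defaults are unreachable)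
def pvLoopR : List (Int × Int) → PySem.Dict (Int × Int) (List Char) → List Char → List Char
  | [], _, ret => ret
  | x :: rest, h, ret =>
    let l := h.getD x []
    pvLoopR rest (h.insert x (l.drop 1)) (ret ++ [l.headD '?'])

def parentingPartner (tasks : List (Int × Int)) : String :=
  let sortedTasks := PySem.List.sorted2 tasks (fun x => x.1) (fun x => x.2)
  match pvLoopA sortedTasks PySem.Dict.empty 0 0 with
  | none => "IMPOSSIBLE"
  | some h => String.ofList (pvLoopR tasks h [])

-- ===== PORT B =====
-- the inner 'def peel(idxs)' loop: greedy compatible chain into 'taken', everything else into 'rest'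
-- (indices come from range(len(tasks)), so pyGetD's default is unreachable)
def pvPeel (tasks : List (Int × Int)) : List Int → List Int → List Int → Int →
    List Int × List Int
  | [], taken, rest, _ => (taken, rest)
  | i :: is, taken, rest, curr =>
    let t := PySem.List.pyGetD tasks i (0, 0)
    if t.1 ≥ curr then pvPeel tasks is (taken ++ [i]) rest t.2
    else pvPeel tasks is taken (rest ++ [i]) curr

def parentingPartner_alt (tasks : List (Int × Int)) : String :=
  let n : Int := (tasks.length : Int)
  let order := PySem.List.sorted2 (PySem.List.pyRange 0 n 1)
      (fun i => (PySem.List.pyGetD tasks i (0, 0)).1) (fun i => (PySem.List.pyGetD tasks i (0, 0)).2)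
  let p1 := pvPeel tasks order [] [] 0          -- cameron, rest = peel(order)
  let p2 := pvPeel tasks p1.2 [] [] 0           -- jamie, rest = peel(rest)
  if p2.2 ≠ [] then "IMPOSSIBLE"
  else
    -- ans = ['']*n; ans[i] = 'C' for i in cameron; ans[i] = 'J' for i in jamie; ''.join(ans)
    let ans0 := PySem.List.pyRepeat [""] n
    let ans1 := p1.1.foldl (fun a i => a.set i.toNat "C") ans0
    let ans2 := p2.1.foldl (fun a i => a.set i.toNat "J") ans1
    PySem.Str.join "" ans2

-- ===== PRECONDITION & SPEC =====
def Spec_parentingPartner (tasks : List (Int × Int)) (out : String) : Prop := out = parentingPartner_alt tasks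
instance (tasks : List (Int × Int)) (out : String) : Decidable (Spec_parentingPartner tasks out) := by unfold Spec_parentingPartner; infer_instance

-- ===== CLAIM (what is proved, stated in full; the proofs are below) =====
def Claim_equal_parentingPartner : Prop := ∀ (tasks : List (Int × Int)), Dom_parentingPartner tasks → Spec_parentingPartner tasks (parentingPartner tasks)

-- ===== LEMMAS AND PROOFS =====

-- tasks[i] as a total function of the index
def pvF (tasks : List (Int × Int)) (i : Int) : Int × Int := PySem.List.pyGetD tasks i (0, 0)

-- the comparator sorted2 uses, on the (already tupled) key
def pvLtV (x y : Int × Int) : Bool :=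
  decide (x.1 < y.1) || (!decide (y.1 < x.1) && decide (x.2 < y.2))

-- the interleaved greedy decision sequence: one char per element of the (sorted) input
def pvGreedy : List (Int × Int) → Int → Int → Option (List Char)
  | [], _, _ => some []
  | x :: r, cam, _jam =>
    if x.1 ≥ cam then (pvGreedy r x.2 _jam).map ('C' :: ·)
    else if x.1 ≥ _jam then (pvGreedy r cam x.2).map ('J' :: ·)
    else none

theorem pvLtV_iff (x y : Int × Int) :
    pvLtV x y = true ↔ (x.1 < y.1 ∨ (x.1 = y.1 ∧ x.2 < y.2)) := by
  simp [pvLtV]; omega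

theorem pv_sorted2_eq (tasks : List (Int × Int)) :
    PySem.List.sorted2 tasks (fun x => x.1) (fun x => x.2) =
      tasks.foldl (fun acc x => PySem.List.insertBy (fun a b => pvLtV a b) x acc) [] := rfl

theorem pv_sorted2_idx_eq (tasks : List (Int × Int)) (R : List Int) :
    PySem.List.sorted2 R (fun i => (pvF tasks i).1) (fun i => (pvF tasks i).2) =
      R.foldl (fun acc i =>
        PySem.List.insertBy (fun a b => pvLtV (pvF tasks a) (pvF tasks b)) i acc) [] := rfl

theorem pv_map_insertBy (f : Int → Int × Int) (i : Int) (js : List Int) :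
    (PySem.List.insertBy (fun a b => pvLtV (f a) (f b)) i js).map f =
      PySem.List.insertBy (fun a b => pvLtV a b) (f i) (js.map f) := by
  induction js with
  | nil => rfl
  | cons y ys ih =>
    by_cases h : pvLtV (f i) (f y)
    · simp [PySem.List.insertBy, h]
    · simp [PySem.List.insertBy, h, ih]

theorem pv_map_foldl_insertBy (f : Int → Int × Int) (js : List Int) (acc : List Int) :
    (js.foldl (fun acc i => PySem.List.insertBy (fun a b => pvLtV (f a) (f b)) i acc) acc).map f =
      (js.map f).foldl (fun acc x => PySem.List.insertBy (fun a b => pvLtV a b) x acc) (acc.map f) := by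
  induction js generalizing acc with
  | nil => rfl
  | cons j js ih =>
    simp only [List.foldl_cons, List.map_cons]
    rw [ih, pv_map_insertBy]

-- sort bridge: A's sorted task list is B's sorted index list mapped through tasks[·]
theorem pv_bridge (tasks : List (Int × Int)) :
    PySem.List.sorted2 tasks (fun x => x.1) (fun x => x.2) =
      (PySem.List.sorted2 (PySem.List.pyRange 0 (tasks.length : Int) 1)
        (fun i => (pvF tasks i).1) (fun i => (pvF tasks i).2)).map (pvF tasks) := by
  have hT : (PySem.List.pyRange 0 (tasks.length : Int) 1).map (pvF tasks) = tasks := by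
    simpa [pvF] using PySem.List.map_pyGetD_pyRange_zero' tasks ((0 : Int), (0 : Int))
  rw [pv_sorted2_eq, pv_sorted2_idx_eq, pv_map_foldl_insertBy, hT]
  rfl

-- stability of the insertion sort: filtering one key-equality class commutes with sorting
theorem pv_filter_insertBy (f : Int → Int × Int) (t : Int × Int) (i : Int) (acc : List Int)
    (hs : acc.Pairwise (fun a b => pvLtV (f b) (f a) = false)) :
    (PySem.List.insertBy (fun a b => pvLtV (f a) (f b)) i acc).filter (fun j => f j == t) =
      if f i = t then acc.filter (fun j => f j == t) ++ [i]
      else acc.filter (fun j => f j == t) := by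
  induction acc with
  | nil =>
    by_cases h : f i = t
    · simp [PySem.List.insertBy, h]
    · simp [PySem.List.insertBy, h]
  | cons y ys ih =>
    obtain ⟨hy, hs'⟩ := List.pairwise_cons.1 hs
    by_cases hb : pvLtV (f i) (f y) = true
    · have hins : PySem.List.insertBy (fun a b => pvLtV (f a) (f b)) i (y :: ys) = i :: y :: ys := by
        simp [PySem.List.insertBy, hb]
      rw [hins]
      by_cases hit : f i = t
      · have hynt : (f y = t) → False := by
          intro he
          rw [hit, ← he] at hb
          have := (pvLtV_iff (f y) (f y)).1 hb
          omega
        have hnil : List.filter (fun j => f j == t) (y :: ys) = [] := by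
          rw [List.filter_eq_nil_iff]
          intro b hbm
          simp only [beq_iff_eq]
          rcases List.mem_cons.1 hbm with rfl | hbm'
          · exact hynt
          · intro he
            have hbi : pvLtV (f b) (f y) = true := by rw [he, ← hit]; exact hb
            have := hy b hbm'
            simp [this] at hbi
        rw [List.filter_cons, hnil]
        simp [hit]
      · rw [List.filter_cons]
        have hf : (f i == t) = false := by simp [hit]
        rw [hf]
        simp [hit]
    · have hins : PySem.List.insertBy (fun a b => pvLtV (f a) (f b)) i (y :: ys) =
          y :: PySem.List.insertBy (fun a b => pvLtV (f a) (f b)) i ys := by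
        simp [PySem.List.insertBy, hb]
      rw [hins, List.filter_cons, List.filter_cons, ih hs']
      by_cases hyt : f y = t <;> by_cases hit : f i = t <;> simp [hyt, hit]

theorem pv_insertBy_pairwise (f : Int → Int × Int) (i : Int) (acc : List Int)
    (hs : acc.Pairwise (fun a b => pvLtV (f b) (f a) = false)) :
    (PySem.List.insertBy (fun a b => pvLtV (f a) (f b)) i acc).Pairwise
      (fun a b => pvLtV (f b) (f a) = false) := by
  induction acc with
  | nil => simp [PySem.List.insertBy]
  | cons y ys ih =>
    obtain ⟨hy, hs'⟩ := List.pairwise_cons.1 hs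
    by_cases hb : pvLtV (f i) (f y) = true
    · have hins : PySem.List.insertBy (fun a b => pvLtV (f a) (f b)) i (y :: ys) = i :: y :: ys := by
        simp [PySem.List.insertBy, hb]
      rw [hins]
      refine List.pairwise_cons.2 ⟨?_, hs⟩
      intro b hbm
      rcases List.mem_cons.1 hbm with rfl | hbm'
      · have h1 := (pvLtV_iff (f i) (f b)).1 hb
        rw [Bool.eq_false_iff]
        intro hc
        have h2 := (pvLtV_iff (f b) (f i)).1 hc
        omega
      · have hbf := hy b hbm'
        have h1 := (pvLtV_iff (f i) (f y)).1 hb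
        rw [Bool.eq_false_iff]
        intro hc
        have h2 := (pvLtV_iff (f b) (f i)).1 hc
        have h3 : ¬((f b).1 < (f y).1 ∨ ((f b).1 = (f y).1 ∧ (f b).2 < (f y).2)) := by
          rw [← pvLtV_iff]
          simp [hbf]
        omega
    · have hins : PySem.List.insertBy (fun a b => pvLtV (f a) (f b)) i (y :: ys) =
          y :: PySem.List.insertBy (fun a b => pvLtV (f a) (f b)) i ys := by
        simp [PySem.List.insertBy, hb]
      rw [hins]
      refine List.pairwise_cons.2 ⟨?_, ih hs'⟩
      intro b hbm
      rcases (PySem.List.mem_insertBy _ _ _ _).1 hbm with rfl | hbm'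
      · simpa using hb
      · exact hy b hbm'

theorem pv_stability (f : Int → Int × Int) (t : Int × Int) (xs acc : List Int)
    (hs : acc.Pairwise (fun a b => pvLtV (f b) (f a) = false)) :
    ((xs.foldl (fun acc i => PySem.List.insertBy (fun a b => pvLtV (f a) (f b)) i acc) acc).filter
        (fun j => f j == t)) =
      acc.filter (fun j => f j == t) ++ xs.filter (fun j => f j == t) := by
  induction xs generalizing acc with
  | nil => simp
  | cons x xs ih =>
    simp only [List.foldl_cons]
    rw [ih _ (pv_insertBy_pairwise f x acc hs), pv_filter_insertBy f t x acc hs]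
    by_cases h : f x = t
    · simp [h]
    · simp [h]

-- A's first loop = the greedy decisions, the dict being a fold of pvDstepA over the zip
theorem pv_A1 (xs : List (Int × Int)) (h : PySem.Dict (Int × Int) (List Char)) (cam jam : Int) :
    pvLoopA xs h cam jam =
      (pvGreedy xs cam jam).map (fun cs => (xs.zip cs).foldl (fun d p => pvDstepA d p.1 p.2) h) := by
  induction xs generalizing h cam jam with
  | nil => simp [pvLoopA, pvGreedy]
  | cons x r ih =>
    simp only [pvLoopA, pvGreedy]
    by_cases h1 : x.1 ≥ cam
    · rw [if_pos h1, if_pos h1, ih]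
      cases pvGreedy r x.2 jam <;> simp [List.zip]
    · rw [if_neg h1, if_neg h1]
      by_cases h2 : x.1 ≥ jam
      · rw [if_pos h2, if_pos h2, ih]
        cases pvGreedy r cam x.2 <;> simp [List.zip]
      · rw [if_neg h2, if_neg h2]
        rfl

theorem pv_getD_dstepA (h : PySem.Dict (Int × Int) (List Char)) (x : Int × Int) (c : Char)
    (t : Int × Int) :
    (pvDstepA h x c).getD t [] = if t = x then h.getD t [] ++ [c] else h.getD t [] := by
  have hbase : ∀ y, (if h.contains x then h else h.insert x []).getD y [] = h.getD y [] := by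
    intro y
    by_cases hc : h.contains x = true
    · simp [hc]
    · rw [if_neg hc, PySem.Dict.getD_insert]
      by_cases hy : y = x
      · subst hy
        rw [if_pos rfl, PySem.Dict.getD_of_not_contains h [] (by simp [hc])]
      · rw [if_neg hy]
  show ((if h.contains x then h else h.insert x []).insert x
      ((if h.contains x then h else h.insert x []).getD x [] ++ [c])).getD t [] = _
  rw [PySem.Dict.getD_insert, hbase]
  by_cases ht : t = x
  · subst ht; simp
  · simp [ht, hbase]

theorem pv_A2 (tasks : List (Int × Int)) (ps : List (Int × Char))
    (d : PySem.Dict (Int × Int) (List Char)) (t : Int × Int) :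
    ((ps.foldl (fun d p => pvDstepA d (pvF tasks p.1) p.2) d).getD t []) =
      d.getD t [] ++ (ps.filter (fun p => pvF tasks p.1 == t)).map (·.2) := by
  induction ps generalizing d with
  | nil => simp
  | cons p ps ih =>
    simp only [List.foldl_cons]
    rw [ih, pv_getD_dstepA]
    by_cases hp : pvF tasks p.1 = t
    · simp [hp]
    · simp [hp, Ne.symm hp]

-- the popping second pass: if every per-task queue lists the chars of the pending positions
-- in order, the pass reads off exactly those chars
theorem pv_pop (tasks : List (Int × Int)) (cF : Int → Char) :
    ∀ (js : List Int) (h : PySem.Dict (Int × Int) (List Char)) (ret : List Char),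
      (∀ t, h.getD t [] = (js.filter (fun j => pvF tasks j == t)).map cF) →
      pvLoopR (js.map (pvF tasks)) h ret = ret ++ js.map cF := by
  intro js
  induction js with
  | nil =>
    intro h ret _
    simp [pvLoopR]
  | cons j js ih =>
    intro h ret H
    have hj := H (pvF tasks j)
    rw [List.filter_cons] at hj
    simp only [beq_self_eq_true, if_true] at hj
    simp only [List.map_cons, pvLoopR]
    rw [hj]
    simp only [List.drop_one]
    rw [ih _ _ ?_]
    · simp
    · intro t
      rw [PySem.Dict.getD_insert]
      by_cases ht : t = pvF tasks j
      · rw [if_pos ht, ht]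
        simp
      · rw [if_neg ht, H t, List.filter_cons]
        have : (pvF tasks j == t) = false := by
          simp
          exact fun he => ht he.symm
        simp [this]

-- ===== B-side lemmas: chain peeling =====

-- accumulator form of the peel loop
theorem pv_peel_acc (tasks : List (Int × Int)) (is : List Int) :
    ∀ (tk rs : List Int) (cur : Int),
      pvPeel tasks is tk rs cur =
        (tk ++ (pvPeel tasks is [] [] cur).1, rs ++ (pvPeel tasks is [] [] cur).2) := by
  induction is with
  | nil => intro tk rs cur; simp [pvPeel]
  | cons i is ih =>
    intro tk rs cur
    simp only [pvPeel]
    by_cases h : (PySem.List.pyGetD tasks i (0, 0)).1 ≥ cur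
    · rw [if_pos h, if_pos h, ih (tk ++ [i]) rs, ih ([] ++ [i]) []]
      simp
    · rw [if_neg h, if_neg h, ih tk (rs ++ [i]), ih [] ([] ++ [i])]
      simp

-- the peel loop splits its input into taken ++ rest, up to permutation
theorem pv_peel_perm (tasks : List (Int × Int)) (is : List Int) :
    ∀ (cur : Int),
      is.Perm ((pvPeel tasks is [] [] cur).1 ++ (pvPeel tasks is [] [] cur).2) := by
  induction is with
  | nil => intro cur; simp [pvPeel]
  | cons i is ih =>
    intro cur
    simp only [pvPeel]
    by_cases h : (PySem.List.pyGetD tasks i (0, 0)).1 ≥ cur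
    · rw [if_pos h, pv_peel_acc]
      simpa using (ih (PySem.List.pyGetD tasks i (0, 0)).2).cons i
    · rw [if_neg h, pv_peel_acc]
      exact ((ih cur).cons i).trans List.perm_middle.symm

-- interleaved greedy = two staged peels: Cameron's chars mark the first chain's members,
-- failure of the interleaved greedy = a leftover after the second peel
theorem pv_G (tasks : List (Int × Int)) :
    ∀ (is : List Int) (cam jam : Int), is.Nodup →
      pvGreedy (is.map (pvF tasks)) cam jam =
        (if (pvPeel tasks (pvPeel tasks is [] [] cam).2 [] [] jam).2 = []
         then some (is.map (fun i => if i ∈ (pvPeel tasks is [] [] cam).1 then 'C' else 'J'))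
         else none) := by
  intro is
  induction is with
  | nil => intro cam jam _; simp [pvGreedy, pvPeel]
  | cons i is ih =>
    intro cam jam hnd
    obtain ⟨hi, hnd'⟩ := List.nodup_cons.1 hnd
    simp only [List.map_cons, pvGreedy, pvF]
    by_cases h1 : (PySem.List.pyGetD tasks i (0, 0)).1 ≥ cam
    · -- Cameron takes i in both versions
      have hpeel : pvPeel tasks (i :: is) [] [] cam =
          (i :: (pvPeel tasks is [] [] (PySem.List.pyGetD tasks i (0, 0)).2).1,
           (pvPeel tasks is [] [] (PySem.List.pyGetD tasks i (0, 0)).2).2) := by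
        simp only [pvPeel]
        rw [if_pos h1, pv_peel_acc]
        simp
      rw [if_pos h1, hpeel]
      have hIH := ih (PySem.List.pyGetD tasks i (0, 0)).2 jam hnd'
      rw [hIH]
      by_cases hq : (pvPeel tasks
          (pvPeel tasks is [] [] (PySem.List.pyGetD tasks i (0, 0)).2).2 [] [] jam).2 = []
      · rw [if_pos hq, if_pos hq]
        simp only [Option.map_some, List.mem_cons, Option.some.injEq]
        rw [if_pos (Or.inl trivial)]
        congr 1
        refine List.map_congr_left ?_
        intro j hj
        have hji : j ≠ i := fun he => hi (he ▸ hj)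
        simp [hji]
      · rw [if_neg hq, if_neg hq]
        rfl
    · rw [if_neg h1]
      have hpeel : pvPeel tasks (i :: is) [] [] cam =
          ((pvPeel tasks is [] [] cam).1, i :: (pvPeel tasks is [] [] cam).2) := by
        simp only [pvPeel]
        rw [if_neg h1, pv_peel_acc]
        simp
      rw [hpeel]
      have hitk : i ∉ (pvPeel tasks is [] [] cam).1 := by
        intro hmem
        exact hi ((pv_peel_perm tasks is cam).mem_iff.2 (List.mem_append.2 (Or.inl hmem)))
      by_cases h2 : (PySem.List.pyGetD tasks i (0, 0)).1 ≥ jam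
      · -- Jamie takes i in both versions
        have hpeel2 : pvPeel tasks (i :: (pvPeel tasks is [] [] cam).2) [] [] jam =
            (i :: (pvPeel tasks (pvPeel tasks is [] [] cam).2 [] []
                    (PySem.List.pyGetD tasks i (0, 0)).2).1,
             (pvPeel tasks (pvPeel tasks is [] [] cam).2 [] []
                    (PySem.List.pyGetD tasks i (0, 0)).2).2) := by
          simp only [pvPeel]
          rw [if_pos h2, pv_peel_acc]
          simp
        rw [if_pos h2, hpeel2]
        have hIH := ih cam (PySem.List.pyGetD tasks i (0, 0)).2 hnd'
        rw [hIH]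
        by_cases hq : (pvPeel tasks (pvPeel tasks is [] [] cam).2 [] []
            (PySem.List.pyGetD tasks i (0, 0)).2).2 = []
        · rw [if_pos hq, if_pos hq]
          simp only [Option.map_some, Option.some.injEq]
          rw [if_neg hitk]
        · rw [if_neg hq, if_neg hq]
          rfl
      · -- A fails here; B's second peel leaves i over
        have hpeel2 : pvPeel tasks (i :: (pvPeel tasks is [] [] cam).2) [] [] jam =
            ((pvPeel tasks (pvPeel tasks is [] [] cam).2 [] [] jam).1,
             i :: (pvPeel tasks (pvPeel tasks is [] [] cam).2 [] [] jam).2) := by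
          simp only [pvPeel]
          rw [if_neg h2, pv_peel_acc]
          simp
        rw [if_neg h2, hpeel2]
        simp

-- positional effect of one constant-valued 'for i in js: ans[i] = v' loop
theorem pv_setfold_const (v : String) :
    ∀ (js : List Int) (a0 : List String) (m : Nat),
      (∀ j ∈ js, 0 ≤ j ∧ j < (a0.length : Int)) → m < a0.length →
      (js.foldl (fun a i => a.set i.toNat v) a0)[m]? =
        if (m : Int) ∈ js then some v else a0[m]? := by
  intro js
  induction js with
  | nil => intro a0 m _ _; simp
  | cons j js ih =>
    intro a0 m hb hm
    obtain ⟨hj0, hjlt⟩ := hb j List.mem_cons_self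
    simp only [List.foldl_cons]
    rw [ih (a0.set j.toNat v) m
        (by intro x hx; simpa using hb x (List.mem_cons_of_mem _ hx))
        (by simpa using hm)]
    by_cases hmem : (m : Int) ∈ js
    · simp [hmem]
    · rw [if_neg hmem]
      by_cases hmj : (m : Int) = j
      · have hj : j.toNat = m := by omega
        rw [hj, List.getElem?_set_self hm, if_pos (List.mem_cons.2 (Or.inl hmj))]
      · rw [List.getElem?_set_ne (by omega : j.toNat ≠ m)]
        have : (m : Int) ∉ j :: js := by
          simp [hmj, hmem]
        rw [if_neg this]

theorem pv_setfold_const_len (v : String) (js : List Int) (a0 : List String) :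
    (js.foldl (fun a i => a.set i.toNat v) a0).length = a0.length := by
  induction js generalizing a0 with
  | nil => rfl
  | cons j js ih => simp [List.foldl_cons, ih]

-- joining a list of one-character strings
theorem pv_join_singletons (cs : List Char) :
    PySem.Str.join "" (cs.map (fun c => String.ofList [c])) = String.ofList cs := by
  apply String.toList_injective
  rw [PySem.Str.toList_join]
  simp only [List.map_map]
  have h1 : (String.toList ∘ fun c => String.ofList [c]) = fun c => [c] := by
    funext c; simp
  rw [h1]
  simp

set_option maxHeartbeats 2000000 in
theorem pv_main (tasks : List (Int × Int)) :
    parentingPartner tasks = parentingPartner_alt tasks := by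
  have hA0 : parentingPartner tasks =
      match pvLoopA (PySem.List.sorted2 tasks (fun x => x.1) (fun x => x.2))
          PySem.Dict.empty 0 0 with
      | none => "IMPOSSIBLE"
      | some h => String.ofList (pvLoopR tasks h []) := rfl
  have hB0 : parentingPartner_alt tasks =
      (if (pvPeel tasks
            (pvPeel tasks (PySem.List.sorted2 (PySem.List.pyRange 0 (tasks.length : Int) 1)
              (fun i => (pvF tasks i).1) (fun i => (pvF tasks i).2)) [] [] 0).2 [] [] 0).2 ≠ []
       then "IMPOSSIBLE"
       else PySem.Str.join ""
        ((pvPeel tasks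
            (pvPeel tasks (PySem.List.sorted2 (PySem.List.pyRange 0 (tasks.length : Int) 1)
              (fun i => (pvF tasks i).1) (fun i => (pvF tasks i).2)) [] [] 0).2 [] [] 0).1.foldl
          (fun a i => a.set i.toNat "J")
          ((pvPeel tasks (PySem.List.sorted2 (PySem.List.pyRange 0 (tasks.length : Int) 1)
              (fun i => (pvF tasks i).1) (fun i => (pvF tasks i).2)) [] [] 0).1.foldl
            (fun a i => a.set i.toNat "C")
            (PySem.List.pyRepeat [""] (tasks.length : Int))))) := rfl
  rw [hA0, hB0, pv_bridge tasks, pv_A1]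
  generalize hord : PySem.List.sorted2 (PySem.List.pyRange 0 (tasks.length : Int) 1)
      (fun i => (pvF tasks i).1) (fun i => (pvF tasks i).2) = order
  have hperm : order.Perm (PySem.List.pyRange 0 (tasks.length : Int) 1) := by
    rw [← hord]
    exact PySem.List.sorted2_perm _ _ _ _
  have hndO : order.Nodup := (hperm.nodup_iff).2 (PySem.List.nodup_pyRange_one 0 _)
  have hmemO : ∀ i ∈ order, 0 ≤ i ∧ i < (tasks.length : Int) := fun i hi =>
    PySem.List.mem_pyRange_one.1 (hperm.subset hi)
  have hG := pv_G tasks order 0 0 hndO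
  rw [hG]
  set tk := (pvPeel tasks order [] [] 0).1 with htk
  set rs := (pvPeel tasks order [] [] 0).2 with hrs
  set tj := (pvPeel tasks rs [] [] 0).1 with htj
  set qr := (pvPeel tasks rs [] [] 0).2 with hqr
  have hP1 : order.Perm (tk ++ rs) := pv_peel_perm tasks order 0
  have hP2 : rs.Perm (tj ++ qr) := pv_peel_perm tasks rs 0
  by_cases hq : qr = []
  · rw [if_pos hq, if_neg (by simp [hq])]
    simp only [Option.map_some]
    -- the greedy letter of index j
    set g : Int → Char := fun i => if i ∈ tk then 'C' else 'J' with hg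
    -- properties of the partition
    have hnd12 : (tk ++ rs).Nodup := hP1.nodup_iff.1 hndO
    have hdisj : ∀ j, j ∈ tk → j ∈ rs → False := by
      intro j h1 h2
      exact (List.disjoint_of_nodup_append hnd12) h1 h2
    have hsplit : ∀ j ∈ order, (j ∈ tk) ∨ (j ∈ tj) := by
      intro j hj
      rcases List.mem_append.1 (hP1.mem_iff.1 hj) with h | h
      · exact Or.inl h
      · right
        have := hP2.mem_iff.1 h
        rw [hq] at this
        simpa using this
    have htj_sub : ∀ j ∈ tj, j ∈ rs := by
      intro j hj
      exact hP2.mem_iff.2 (List.mem_append.2 (Or.inl hj))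
    -- A side: the dict holds, for each task value t, the letters of its positions in index order
    have hdict : ∀ t,
        ((((order.map (pvF tasks)).zip (order.map g)).foldl
            (fun d p => pvDstepA d p.1 p.2) PySem.Dict.empty).getD t []) =
          ((PySem.List.pyRange 0 (tasks.length : Int) 1).filter
            (fun j => pvF tasks j == t)).map g := by
      intro t
      rw [List.zip_map', List.foldl_map]
      have hstep : ∀ (d : PySem.Dict (Int × Int) (List Char)) (i : Int),
          pvDstepA d (pvF tasks i, g i).1 (pvF tasks i, g i).2 = pvDstepA d (pvF tasks i) (g i) :=
        fun d i => rfl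
      have h1 : order.foldl (fun d i => pvDstepA d (pvF tasks i, g i).1 (pvF tasks i, g i).2)
            PySem.Dict.empty =
          (order.map (fun i => (i, g i))).foldl
            (fun d p => pvDstepA d (pvF tasks p.1) p.2) PySem.Dict.empty := by
        rw [List.foldl_map]
      rw [h1, pv_A2, PySem.Dict.getD_empty, List.nil_append]
      rw [List.filter_map, List.map_map]
      have h2 : ((fun p : Int × Char => p.2) ∘ fun i => (i, g i)) = g := rfl
      have h3 : ((fun p : Int × Char => pvF tasks p.1 == t) ∘ fun i => (i, g i)) =
          (fun j => pvF tasks j == t) := rfl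
      rw [h2, h3]
      congr 1
      rw [← hord, pv_sorted2_idx_eq]
      simpa using pv_stability (pvF tasks) t (PySem.List.pyRange 0 (tasks.length : Int) 1) []
        List.Pairwise.nil
    have htasks : tasks = (PySem.List.pyRange 0 (tasks.length : Int) 1).map (pvF tasks) := by
      symm
      simpa [pvF] using PySem.List.map_pyGetD_pyRange_zero' tasks ((0 : Int), (0 : Int))
    have hpop := pv_pop tasks g (PySem.List.pyRange 0 (tasks.length : Int) 1)
      (((order.map (pvF tasks)).zip (order.map g)).foldl
        (fun d p => pvDstepA d p.1 p.2) PySem.Dict.empty) [] hdict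
    rw [← htasks] at hpop
    rw [hpop, List.nil_append]
    -- B side: the answer array is the letter list, position by position
    have ha0 : PySem.List.pyRepeat [""] (tasks.length : Int) =
        List.replicate tasks.length "" := by
      rw [PySem.List.pyRepeat_singleton]
      simp
    rw [ha0]
    have hbtk : ∀ j ∈ tk, 0 ≤ j ∧ j < ((List.replicate tasks.length "").length : Int) := by
      intro j hj
      have := hmemO j (hP1.mem_iff.2 (List.mem_append.2 (Or.inl hj)))
      simpa using this
    have hlen1 : (tk.foldl (fun a i => a.set i.toNat "C")
        (List.replicate tasks.length "")).length = tasks.length := by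
      rw [pv_setfold_const_len, List.length_replicate]
    have hbtj : ∀ j ∈ tj, 0 ≤ j ∧ j <
        (((tk.foldl (fun a i => a.set i.toNat "C")
          (List.replicate tasks.length "")).length : Nat) : Int) := by
      intro j hj
      have := hmemO j (hP1.mem_iff.2 (List.mem_append.2 (Or.inr (htj_sub j hj))))
      rw [hlen1]
      exact this
    have hans : (tj.foldl (fun a i => a.set i.toNat "J")
          (tk.foldl (fun a i => a.set i.toNat "C") (List.replicate tasks.length ""))) =
        (PySem.List.pyRange 0 (tasks.length : Int) 1).map (fun j => String.ofList [g j]) := by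
      apply List.ext_getElem
      · rw [pv_setfold_const_len, hlen1, List.length_map, PySem.List.length_pyRange_one]
        omega
      · intro m hm1 hm2
        have hmlt : m < tasks.length := by
          rw [pv_setfold_const_len, hlen1] at hm1
          exact hm1
        have hmo : (m : Int) ∈ order := by
          apply hperm.mem_iff.2
          rw [PySem.List.mem_pyRange_one]
          constructor
          · exact Int.natCast_nonneg m
          · exact_mod_cast hmlt
        have hget2 := pv_setfold_const "J" tj
          (tk.foldl (fun a i => a.set i.toNat "C") (List.replicate tasks.length "")) m hbtj
          (by rw [hlen1]; exact hmlt)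
        have hget1 := pv_setfold_const "C" tk (List.replicate tasks.length "") m hbtk
          (by simpa using hmlt)
        have hrep : (List.replicate tasks.length "")[m]? = some "" :=
          List.getElem?_replicate_of_lt hmlt
        have hval : (tj.foldl (fun a i => a.set i.toNat "J")
              (tk.foldl (fun a i => a.set i.toNat "C") (List.replicate tasks.length "")))[m]? =
            some (String.ofList [g (m : Int)]) := by
          rw [hget2, hget1, hrep]
          rcases hsplit (m : Int) hmo with hc | hj
          · have hnj : (m : Int) ∉ tj := fun hj => hdisj _ hc (htj_sub _ hj)
            rw [if_neg hnj, if_pos hc, hg]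
            simp [hc]
          · have hnc : (m : Int) ∉ tk := fun hc => hdisj _ hc (htj_sub _ hj)
            rw [if_pos hj, hg]
            simp [hnc]
        have hval' := hval
        rw [List.getElem?_eq_getElem (by rw [pv_setfold_const_len, hlen1]; exact hmlt)] at hval'
        rw [Option.some.injEq] at hval'
        rw [hval']
        rw [List.getElem_map, PySem.List.getElem_pyRange_one]
        simp
    rw [hans]
    have hmaps : (PySem.List.pyRange 0 (tasks.length : Int) 1).map
        (fun j => String.ofList [g j]) =
        ((PySem.List.pyRange 0 (tasks.length : Int) 1).map g).map
          (fun c => String.ofList [c]) := by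
      rw [List.map_map]
      rfl
    rw [hmaps, pv_join_singletons]
  · rw [if_neg hq, if_pos (by simp [hq])]
    rfl

-- ===== VERDICT (by name: the statement is the Claim_ definition above) =====
theorem parentingPartner_spec : Claim_equal_parentingPartner := by
  intro tasks _
  unfold Spec_parentingPartner
  exact pv_main tasks
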